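-- pv_equiv track=rewrite | github.com/diegofalves/Ominideck-Suit | ui/backend/writers.py | _read_identifier
-- ===== SOURCE A (Python) =====
-- from typing import Any, Dict, List, Optional, Set, Tuple
--
-- def _read_identifier(text: str, start: int) -> Tuple[str, int]:
--     length = len(text)
--     idx = start
--     while idx < length and text[idx].isspace():
--         idx += 1
--     if idx >= length:
--         return "", idx
--
--     if text[idx] == '"':
--         end = idx + 1
--         while end < length and text[end] != '"':
--             end += 1
--         if end < length:
--             return text[idx : end + 1], end + 1
--         return text[idx:], length
--
--     ident_chars = set("ABCDEFGHIJKLMNOPQRSTUVWXYZabcdefghijklmnopqrstuvwxyz0123456789_$.#@")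
--     end = idx
--     while end < length and text[end] in ident_chars:
--         end += 1
--
--     if end == idx:
--         return "", idx
--     return text[idx:end], end
-- ===== SOURCE B (Python) =====
-- _IDENT_CHARS = frozenset(
--     "ABCDEFGHIJKLMNOPQRSTUVWXYZabcdefghijklmnopqrstuvwxyz0123456789_$.#@")
--
--
-- def _read_identifier(text, start):
--     # single left-to-right pass with a mode variable (a 3-state DFA):
--     # mode 0 = skipping whitespace, 1 = inside a quoted token, 2 = inside an identifier
--     n = len(text)
--     i = max(start, 0)
--     if i >= n:
--         return "", i
--     mode = 0
--     begin = i
--     for j in range(i, n):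
--         ch = text[j]
--         if mode == 0:
--             if ch.isspace():
--                 continue
--             begin = j
--             if ch == '"':
--                 mode = 1
--             elif ch in _IDENT_CHARS:
--                 mode = 2
--             else:
--                 return "", j
--         elif mode == 1:
--             if ch == '"':
--                 return text[begin:j + 1], j + 1
--         else:
--             if ch not in _IDENT_CHARS:
--                 return text[begin:j], j
--     if mode == 0:
--         return "", n
--     return text[begin:], n
-- ===== Notes on version B (the rewrite author's own statement) =====
-- stated objective: alternative
-- what changed: A's three staged index-while loops (skip whitespace, then either scan to the closing quote or scan the identifier run) are replaced by a single left-to-right pass over the characters driven by a 3-state DFA (mode = skipping-whitespace / in-quote / in-identifier) that records the token's begin position at the mode transition and returns as soon as the token ends.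
-- intended difference: On negative start (with -len(text) <= start, where A still returns), A's value comes from Python's accidental negative-index wraparound, yielding truncated or empty tokens and even negative positions; B clamps the position to 0 and parses from the beginning of the string, the intended reading of an out-of-range position (the pinned witness shows both values). — e.g. on _read_identifier("abc", -1): A returns ("c", 3), B returns ("abc", 3)
import Mathlib
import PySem

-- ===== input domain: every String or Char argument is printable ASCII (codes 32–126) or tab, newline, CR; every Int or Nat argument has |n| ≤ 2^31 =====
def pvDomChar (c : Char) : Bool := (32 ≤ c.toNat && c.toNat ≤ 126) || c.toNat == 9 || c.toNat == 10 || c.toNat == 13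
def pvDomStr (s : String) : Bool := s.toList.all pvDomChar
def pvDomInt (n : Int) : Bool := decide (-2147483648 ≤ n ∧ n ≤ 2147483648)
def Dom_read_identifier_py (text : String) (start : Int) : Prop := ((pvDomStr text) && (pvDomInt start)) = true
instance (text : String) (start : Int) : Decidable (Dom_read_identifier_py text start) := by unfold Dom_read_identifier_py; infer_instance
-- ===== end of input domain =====

-- B replaces A's three staged index-while loops by ONE left-to-right pass with a 3-state DFA
-- (mode = skipping-ws / in-quote / in-identifier), objective: alternative; on negative start B
-- clamps the position to 0 where A's value comes from negative-index wraparound (see D_).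

-- ===== PORT A =====
def pvIdentSetA : PySem.Set Char :=
  PySem.Set.ofList "ABCDEFGHIJKLMNOPQRSTUVWXYZabcdefghijklmnopqrstuvwxyz0123456789_$.#@".toList

-- while idx < length and text[idx].isspace(): idx += 1   (in-range access within Pre_;
-- fuel = number of positions left below length, enough for every iteration the loop makes)
def pvSkipWsF : Nat → List Char → Int → Int
  | 0, _, idx => idx
  | fuel + 1, cs, idx =>
    if idx < (cs.length : Int) ∧ PySem.Chars.isspace (PySem.List.pyGetD cs idx ' ') = true then
      pvSkipWsF fuel cs (idx + 1)
    else idx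

def pvSkipWs (cs : List Char) (idx : Int) : Int :=
  pvSkipWsF ((cs.length : Int) - idx).toNat cs idx

-- while end < length and text[end] != '"': end += 1
def pvQuoteEndF : Nat → List Char → Int → Int
  | 0, _, e => e
  | fuel + 1, cs, e =>
    if e < (cs.length : Int) ∧ PySem.List.pyGetD cs e ' ' ≠ '"' then
      pvQuoteEndF fuel cs (e + 1)
    else e

def pvQuoteEnd (cs : List Char) (e : Int) : Int :=
  pvQuoteEndF ((cs.length : Int) - e).toNat cs e

-- while end < length and text[end] in ident_chars: end += 1
def pvIdentEndF : Nat → List Char → Int → Int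
  | 0, _, e => e
  | fuel + 1, cs, e =>
    if e < (cs.length : Int) ∧ PySem.List.pyGetD cs e ' ' ∈ pvIdentSetA then
      pvIdentEndF fuel cs (e + 1)
    else e

def pvIdentEnd (cs : List Char) (e : Int) : Int :=
  pvIdentEndF ((cs.length : Int) - e).toNat cs e

def read_identifier_py (text : String) (start : Int) : String × Int :=
  let cs := text.toList
  let length : Int := cs.length
  let idx := pvSkipWs cs start
  if idx ≥ length then ("", idx)
  else if PySem.List.pyGetD cs idx ' ' = '"' then
    let e := pvQuoteEnd cs (idx + 1)
    if e < length then (String.ofList (PySem.List.slice cs (some idx) (some (e + 1))), e + 1)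
    else (String.ofList (PySem.List.slice cs (some idx) none), length)
  else
    let e := pvIdentEnd cs idx
    if e = idx then ("", idx)
    else (String.ofList (PySem.List.slice cs (some idx) (some e)), e)

-- ===== PORT B =====
def pvIdentSetB : PySem.Set Char :=
  PySem.Set.ofList "ABCDEFGHIJKLMNOPQRSTUVWXYZabcdefghijklmnopqrstuvwxyz0123456789_$.#@".toList

-- mode 1 of the DFA (inside a quoted token); l is the remaining suffix text[j:],
-- slices text[b:j+1] / text[b:] are ported exactly as drop/take (0 ≤ b ≤ j+1 ≤ len here)
def pvScan1 (cs : List Char) (b : Nat) : Nat → List Char → String × Int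
  | _, [] => (String.ofList (cs.drop b), (cs.length : Int))
  | j, c :: rest =>
    if c = '"' then (String.ofList ((cs.drop b).take (j + 1 - b)), ((j : Int) + 1))
    else pvScan1 cs b (j + 1) rest

-- mode 2 of the DFA (inside an identifier)
def pvScan2 (cs : List Char) (b : Nat) : Nat → List Char → String × Int
  | _, [] => (String.ofList (cs.drop b), (cs.length : Int))
  | j, c :: rest =>
    if c ∈ pvIdentSetB then pvScan2 cs b (j + 1) rest
    else (String.ofList ((cs.drop b).take (j - b)), (j : Int))

-- mode 0 of the DFA (skipping whitespace); hands over to mode 1 / mode 2 at the first non-space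
def pvScan0 (cs : List Char) : Nat → List Char → String × Int
  | _, [] => ("", (cs.length : Int))
  | j, c :: rest =>
    if PySem.Chars.isspace c then pvScan0 cs (j + 1) rest
    else if c = '"' then pvScan1 cs j (j + 1) rest
    else if c ∈ pvIdentSetB then pvScan2 cs j (j + 1) rest
    else ("", (j : Int))

def read_identifier_py_alt (text : String) (start : Int) : String × Int :=
  let cs := text.toList
  let n : Int := cs.length
  let i : Int := max start 0
  if i ≥ n then ("", i)
  else pvScan0 cs i.toNat (cs.drop i.toNat)

-- ===== PRECONDITION & SPEC =====
-- Pre_ excludes start < -len(text), where A raises IndexError at text[idx].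
def Pre_read_identifier_py (text : String) (start : Int) : Prop :=
  -(PySem.Str.len text) ≤ start
instance (text : String) (start : Int) : Decidable (Pre_read_identifier_py text start) := by
  unfold Pre_read_identifier_py; infer_instance

def pvWitness_read_identifier_py : String × Int := ("  foo \"bar\"", 0)

-- On negative start (within range), A returns values produced by Python's accidental negative-index
-- wraparound (truncated or empty tokens, even negative positions); B clamps the position to 0 and
-- parses from the beginning, which is the intended reading of an out-of-range position.
def D_read_identifier_py (text : String) (start : Int) : Prop := start < 0
instance (text : String) (start : Int) : Decidable (D_read_identifier_py text start) := by
  unfold D_read_identifier_py; infer_instance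

def Spec_read_identifier_py (text : String) (start : Int) (out : String × Int) : Prop :=
  ¬ D_read_identifier_py text start → out = read_identifier_py_alt text start
instance (text : String) (start : Int) (out : String × Int) : Decidable (Spec_read_identifier_py text start out) := by
  unfold Spec_read_identifier_py; infer_instance

def pvDiffWitness_read_identifier_py : String × Int := ("abc", -1)
def pvDiffWitnessOut_read_identifier_py : (String × Int) × (String × Int) := (("c", 3), ("abc", 3))

-- ===== CLAIM (what is proved, stated in full; the proofs are below) =====
def Claim_unchanged_read_identifier_py : Prop := ∀ (text : String) (start : Int), Dom_read_identifier_py text start → Pre_read_identifier_py text start → Spec_read_identifier_py text start (read_identifier_py text start)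
def Claim_changed_read_identifier_py : Prop := Dom_read_identifier_py (pvDiffWitness_read_identifier_py.1) (pvDiffWitness_read_identifier_py.2) ∧ Pre_read_identifier_py (pvDiffWitness_read_identifier_py.1) (pvDiffWitness_read_identifier_py.2) ∧ D_read_identifier_py (pvDiffWitness_read_identifier_py.1) (pvDiffWitness_read_identifier_py.2) ∧ read_identifier_py (pvDiffWitness_read_identifier_py.1) (pvDiffWitness_read_identifier_py.2) = pvDiffWitnessOut_read_identifier_py.1 ∧ read_identifier_py_alt (pvDiffWitness_read_identifier_py.1) (pvDiffWitness_read_identifier_py.2) = pvDiffWitnessOut_read_identifier_py.2 ∧ pvDiffWitnessOut_read_identifier_py.1 ≠ pvDiffWitnessOut_read_identifier_py.2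

-- ===== LEMMAS AND PROOFS =====

theorem pvSkipWsF_eq (fuel : Nat) : ∀ (cs : List Char) (i : Int), 0 ≤ i →
    (cs.length : Int) - i ≤ fuel →
    pvSkipWsF fuel cs i = i + (((cs.drop i.toNat).takeWhile PySem.Chars.isspace).length : Int) := by
  induction fuel with
  | zero =>
    intro cs i h0 hf
    have : cs.drop i.toNat = [] := List.drop_eq_nil_of_le (by omega)
    simp [pvSkipWsF, this]
  | succ fuel ih =>
    intro cs i h0 hf
    by_cases hg : i < (cs.length : Int) ∧ PySem.Chars.isspace (PySem.List.pyGetD cs i ' ') = true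
    · obtain ⟨hlt, hs⟩ := hg
      have hnat : i.toNat < cs.length := by omega
      rw [PySem.List.pyGetD_eq_getElem cs ' ' h0 hlt] at hs
      have hdrop : cs.drop i.toNat = cs[i.toNat] :: cs.drop (i.toNat + 1) :=
        List.drop_eq_getElem_cons hnat
      have : pvSkipWsF (fuel + 1) cs i = pvSkipWsF fuel cs (i + 1) := by
        simp [pvSkipWsF, hlt, PySem.List.pyGetD_eq_getElem cs ' ' h0 hlt, hs]
      rw [this, ih cs (i + 1) (by omega) (by omega)]
      have h1 : (i + 1).toNat = i.toNat + 1 := by omega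
      rw [h1, hdrop, List.takeWhile_cons, hs]
      simp; omega
    · have hstop : pvSkipWsF (fuel + 1) cs i = i := by simp [pvSkipWsF]; intro h1 h2; exact absurd ⟨h1, h2⟩ hg
      rw [hstop]
      by_cases hlt : i < (cs.length : Int)
      · have h0' : i.toNat < cs.length := by omega
        have hs : ¬ PySem.Chars.isspace (PySem.List.pyGetD cs i ' ') = true := fun h => hg ⟨hlt, h⟩
        rw [PySem.List.pyGetD_eq_getElem cs ' ' h0 hlt] at hs
        rw [List.drop_eq_getElem_cons h0', List.takeWhile_cons]
        simp [hs]
      · have : cs.drop i.toNat = [] := List.drop_eq_nil_of_le (by omega)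
        simp [this]

theorem pvSkipWs_eq (cs : List Char) (i : Int) (h0 : 0 ≤ i) :
    pvSkipWs cs i = i + (((cs.drop i.toNat).takeWhile PySem.Chars.isspace).length : Int) :=
  pvSkipWsF_eq _ cs i h0 (by omega)

theorem pvQuoteEndF_eq (fuel : Nat) : ∀ (cs : List Char) (i : Int), 0 ≤ i →
    (cs.length : Int) - i ≤ fuel →
    pvQuoteEndF fuel cs i = i + (((cs.drop i.toNat).takeWhile (fun c => !decide (c = '"'))).length : Int) := by
  induction fuel with
  | zero =>
    intro cs i h0 hf
    have : cs.drop i.toNat = [] := List.drop_eq_nil_of_le (by omega)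
    simp [pvQuoteEndF, this]
  | succ fuel ih =>
    intro cs i h0 hf
    by_cases hg : i < (cs.length : Int) ∧ PySem.List.pyGetD cs i ' ' ≠ '"'
    · obtain ⟨hlt, hs⟩ := hg
      have hnat : i.toNat < cs.length := by omega
      rw [PySem.List.pyGetD_eq_getElem cs ' ' h0 hlt] at hs
      have hdrop : cs.drop i.toNat = cs[i.toNat] :: cs.drop (i.toNat + 1) :=
        List.drop_eq_getElem_cons hnat
      have hstep : pvQuoteEndF (fuel + 1) cs i = pvQuoteEndF fuel cs (i + 1) := by
        simp [pvQuoteEndF, hlt, PySem.List.pyGetD_eq_getElem cs ' ' h0 hlt, hs]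
      rw [hstep, ih cs (i + 1) (by omega) (by omega)]
      have h1 : (i + 1).toNat = i.toNat + 1 := by omega
      rw [h1, hdrop, List.takeWhile_cons]
      simp [hs]; omega
    · have hstop : pvQuoteEndF (fuel + 1) cs i = i := by
        simp [pvQuoteEndF]; intro h1 h2; exact absurd ⟨h1, h2⟩ hg
      rw [hstop]
      by_cases hlt : i < (cs.length : Int)
      · have h0' : i.toNat < cs.length := by omega
        have hs : ¬ PySem.List.pyGetD cs i ' ' ≠ '"' := fun h => hg ⟨hlt, h⟩
        rw [PySem.List.pyGetD_eq_getElem cs ' ' h0 hlt] at hs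
        rw [List.drop_eq_getElem_cons h0', List.takeWhile_cons]
        simp [not_not.mp hs]
      · have : cs.drop i.toNat = [] := List.drop_eq_nil_of_le (by omega)
        simp [this]

theorem pvIdentEndF_eq (fuel : Nat) : ∀ (cs : List Char) (i : Int), 0 ≤ i →
    (cs.length : Int) - i ≤ fuel →
    pvIdentEndF fuel cs i = i + (((cs.drop i.toNat).takeWhile (fun c => decide (c ∈ pvIdentSetA))).length : Int) := by
  induction fuel with
  | zero =>
    intro cs i h0 hf
    have : cs.drop i.toNat = [] := List.drop_eq_nil_of_le (by omega)
    simp [pvIdentEndF, this]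
  | succ fuel ih =>
    intro cs i h0 hf
    by_cases hg : i < (cs.length : Int) ∧ PySem.List.pyGetD cs i ' ' ∈ pvIdentSetA
    · obtain ⟨hlt, hs⟩ := hg
      have hnat : i.toNat < cs.length := by omega
      rw [PySem.List.pyGetD_eq_getElem cs ' ' h0 hlt] at hs
      have hdrop : cs.drop i.toNat = cs[i.toNat] :: cs.drop (i.toNat + 1) :=
        List.drop_eq_getElem_cons hnat
      have hstep : pvIdentEndF (fuel + 1) cs i = pvIdentEndF fuel cs (i + 1) := by
        simp [pvIdentEndF, hlt, PySem.List.pyGetD_eq_getElem cs ' ' h0 hlt, hs]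
      rw [hstep, ih cs (i + 1) (by omega) (by omega)]
      have h1 : (i + 1).toNat = i.toNat + 1 := by omega
      rw [h1, hdrop, List.takeWhile_cons]
      simp [hs]; omega
    · have hstop : pvIdentEndF (fuel + 1) cs i = i := by
        simp [pvIdentEndF]; intro h1 h2; exact absurd ⟨h1, h2⟩ hg
      rw [hstop]
      by_cases hlt : i < (cs.length : Int)
      · have h0' : i.toNat < cs.length := by omega
        have hs : PySem.List.pyGetD cs i ' ' ∉ pvIdentSetA := fun h => hg ⟨hlt, h⟩
        rw [PySem.List.pyGetD_eq_getElem cs ' ' h0 hlt] at hs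
        rw [List.drop_eq_getElem_cons h0', List.takeWhile_cons]
        simp [hs]
      · have : cs.drop i.toNat = [] := List.drop_eq_nil_of_le (by omega)
        simp [this]

theorem pvQuoteEnd_eq (cs : List Char) (i : Int) (h0 : 0 ≤ i) :
    pvQuoteEnd cs i = i + (((cs.drop i.toNat).takeWhile (fun c => !decide (c = '"'))).length : Int) :=
  pvQuoteEndF_eq _ cs i h0 (by omega)

theorem pvIdentEnd_eq (cs : List Char) (i : Int) (h0 : 0 ≤ i) :
    pvIdentEnd cs i = i + (((cs.drop i.toNat).takeWhile (fun c => decide (c ∈ pvIdentSetA))).length : Int) :=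
  pvIdentEndF_eq _ cs i h0 (by omega)

theorem pvDropTakeWhile (p : Char → Bool) (l : List Char) :
    l.drop (l.takeWhile p).length = l.dropWhile p := by
  induction l with
  | nil => rfl
  | cons a t ih =>
    by_cases h : p a
    · simp [h, ih]
    · simp [List.takeWhile_cons, h]

theorem pvHeadDropWhile (p : Char → Bool) (l : List Char) (a : Char)
    (h : (l.dropWhile p).head? = some a) : p a = false := by
  induction l with
  | nil => simp [List.dropWhile] at h
  | cons b t ih =>
    rw [List.dropWhile_cons] at h
    by_cases hb : p b
    · simp [hb] at h; exact ih h
    · simp [hb] at h; subst h; simpa using hb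

-- B-side characterizations: each scan mode, entered with the true suffix cs.drop j, computes
-- the same takeWhile-prefix data as A's corresponding while loop.

theorem pvScan1_eq (cs : List Char) (b : Nat) (l : List Char) : ∀ (j : Nat),
    cs.drop j = l → j ≤ cs.length →
    pvScan1 cs b j l =
      (if j + (l.takeWhile (fun c => !decide (c = '"'))).length < cs.length then
        (String.ofList ((cs.drop b).take (j + (l.takeWhile (fun c => !decide (c = '"'))).length + 1 - b)),
         ((j + (l.takeWhile (fun c => !decide (c = '"'))).length : Nat) : Int) + 1)
      else (String.ofList (cs.drop b), (cs.length : Int))) := by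
  induction l with
  | nil =>
    intro j hl hjl
    have hlen : cs.length ≤ j := by
      by_contra h
      have := List.drop_eq_nil_iff.mp hl
      omega
    have hj : j = cs.length := by omega
    simp [pvScan1, hj]
  | cons c rest ih =>
    intro j hl hjl
    have hjlt : j < cs.length := by
      by_contra h
      have : cs.drop j = [] := List.drop_eq_nil_of_le (by omega)
      rw [this] at hl; cases hl
    have hrest : cs.drop (j + 1) = rest := by
      have : cs.drop (j + 1) = (cs.drop j).drop 1 := by
        rw [List.drop_drop]
      rw [this, hl]; rfl
    by_cases hc : c = '"'
    · subst hc
      simp only [pvScan1, if_pos rfl, List.takeWhile_cons]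
      simp [hjlt]
    · have hstep : pvScan1 cs b j (c :: rest) = pvScan1 cs b (j + 1) rest := by
        simp [pvScan1, hc]
      rw [hstep, ih (j + 1) hrest (by omega)]
      rw [List.takeWhile_cons]
      simp only [hc, decide_false, Bool.not_false, if_true, List.length_cons]
      have harith : j + 1 + (rest.takeWhile (fun c => !decide (c = '"'))).length
          = j + ((rest.takeWhile (fun c => !decide (c = '"'))).length + 1) := by omega
      rw [harith]

theorem pvScan2_eq (cs : List Char) (b : Nat) (l : List Char) : ∀ (j : Nat),
    cs.drop j = l → j ≤ cs.length → b ≤ j →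
    pvScan2 cs b j l =
      (String.ofList ((cs.drop b).take (j + (l.takeWhile (fun c => decide (c ∈ pvIdentSetB))).length - b)),
       ((j + (l.takeWhile (fun c => decide (c ∈ pvIdentSetB))).length : Nat) : Int)) := by
  induction l with
  | nil =>
    intro j hl hjl hbj
    have hlen : cs.length ≤ j := by
      by_contra h
      have := List.drop_eq_nil_iff.mp hl
      omega
    have hj : j = cs.length := by omega
    have hfull : (cs.drop b).take (j + 0 - b) = cs.drop b := by
      apply List.take_of_length_le
      simp [hj]
    simp only [pvScan2, List.takeWhile_nil, List.length_nil]
    rw [hfull]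
    simp [hj]
  | cons c rest ih =>
    intro j hl hjl hbj
    have hjlt : j < cs.length := by
      by_contra h
      have : cs.drop j = [] := List.drop_eq_nil_of_le (by omega)
      rw [this] at hl; cases hl
    have hrest : cs.drop (j + 1) = rest := by
      have : cs.drop (j + 1) = (cs.drop j).drop 1 := by
        rw [List.drop_drop]
      rw [this, hl]; rfl
    by_cases hc : c ∈ pvIdentSetB
    · have hstep : pvScan2 cs b j (c :: rest) = pvScan2 cs b (j + 1) rest := by
        simp [pvScan2, hc]
      rw [hstep, ih (j + 1) hrest (by omega) (by omega)]
      rw [List.takeWhile_cons]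
      simp only [hc, decide_true, if_true, List.length_cons]
      have harith : j + 1 + (rest.takeWhile (fun c => decide (c ∈ pvIdentSetB))).length
          = j + ((rest.takeWhile (fun c => decide (c ∈ pvIdentSetB))).length + 1) := by omega
      rw [harith]
    · simp [pvScan2, hc, List.takeWhile_cons]

theorem pvScan0_skip (cs : List Char) (l : List Char) : ∀ (j : Nat),
    cs.drop j = l →
    pvScan0 cs j l =
      pvScan0 cs (j + (l.takeWhile PySem.Chars.isspace).length)
        (cs.drop (j + (l.takeWhile PySem.Chars.isspace).length)) := by
  induction l with
  | nil => intro j hl; simp [hl]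
  | cons c rest ih =>
    intro j hl
    have hrest : cs.drop (j + 1) = rest := by
      have : cs.drop (j + 1) = (cs.drop j).drop 1 := by rw [List.drop_drop]
      rw [this, hl]; rfl
    by_cases hs : PySem.Chars.isspace c = true
    · have hstep : pvScan0 cs j (c :: rest) = pvScan0 cs (j + 1) rest := by
        simp [pvScan0, hs]
      rw [hstep, ih (j + 1) hrest]
      simp only [List.takeWhile_cons, hs, if_true, List.length_cons]
      have : j + 1 + (rest.takeWhile PySem.Chars.isspace).length
          = j + ((rest.takeWhile PySem.Chars.isspace).length + 1) := by omega
      rw [this]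
    · rw [List.takeWhile_cons]
      simp only [hs]
      simp [hl]

theorem pvSetsAB : pvIdentSetB = pvIdentSetA := rfl

-- ===== VERDICT (by name: the statement is the Claim_ definition above) =====
theorem read_identifier_py_spec : Claim_unchanged_read_identifier_py := by
  intro text start hdom hpre hnd
  unfold D_read_identifier_py at hnd
  have h0 : 0 ≤ start := by omega
  unfold read_identifier_py read_identifier_py_alt
  simp only [max_eq_left h0, pvSkipWs_eq text.toList start h0]
  set cs := text.toList with hcs
  set k := ((cs.drop start.toNat).takeWhile PySem.Chars.isspace).length with hk
  have hkle : k ≤ cs.length - start.toNat := by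
    have h1 : k ≤ (cs.drop start.toNat).length := (List.takeWhile_prefix _).length_le
    have h2 : (cs.drop start.toNat).length = cs.length - start.toNat := List.length_drop
    omega
  set i : Nat := start.toNat + k with hi
  have hiInt : start + (k : Int) = (i : Int) := by omega
  have hdropi : cs.drop i = (cs.drop start.toNat).drop k := by
    rw [List.drop_drop]
  by_cases hend : start + (k : Int) ≥ (cs.length : Int)
  · -- both guards / end of string in mode 0
    by_cases hg : start ≥ (cs.length : Int)
    · have hk0 : k = 0 := by
        rw [hk, List.drop_eq_nil_of_le (by omega : cs.length ≤ start.toNat)]; rfl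
      rw [if_pos hend, if_pos hg, Prod.mk.injEq]
      exact ⟨rfl, by omega⟩
    · have hieq : i = cs.length := by omega
      rw [if_pos hend, if_neg hg]
      rw [pvScan0_skip cs (cs.drop start.toNat) start.toNat rfl, ← hk, ← hi, hieq]
      rw [List.drop_length]
      simp only [pvScan0]
      rw [Prod.mk.injEq]
      exact ⟨rfl, by omega⟩
  · simp only [if_neg hend]
    have hglt : ¬ start ≥ (cs.length : Int) := by omega
    simp only [if_neg hglt]
    rw [pvScan0_skip cs (cs.drop start.toNat) start.toNat rfl, ← hk, ← hi]
    have hilt : i < cs.length := by omega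
    -- the character at position i
    have hdropc : cs.drop i = cs[i] :: cs.drop (i + 1) := List.drop_eq_getElem_cons hilt
    set c := cs[i] with hc
    have hgetD : PySem.List.pyGetD cs (start + (k : Int)) ' ' = c := by
      rw [hiInt, PySem.List.pyGetD_natCast]
      exact List.getD_eq_getElem cs ' ' hilt
    have hdrop1 : cs.drop (i + 1) = (cs.drop i).drop 1 := by rw [List.drop_drop]
    by_cases hq : c = '"'
    · -- quote branch
      rw [hgetD]
      simp only [if_pos hq, hdropc, pvScan0]
      have hns : PySem.Chars.isspace c = false := by
        -- i is past the whitespace prefix: head of dropWhile fails the predicate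
        have hdw : cs.drop i = (cs.drop start.toNat).dropWhile PySem.Chars.isspace := by
          rw [hdropi, hk, pvDropTakeWhile]
        exact pvHeadDropWhile PySem.Chars.isspace (cs.drop start.toNat) c
          (by rw [← hdw, hdropc]; rfl)
      simp only [hns, Bool.false_eq_true, if_false, if_pos hq]
      -- A side: e = idx + 1 + m
      have he1 : start + (k : Int) + 1 = ((i + 1 : Nat) : Int) := by omega
      rw [pvQuoteEnd_eq cs (start + (k : Int) + 1) (by omega), he1]
      simp only [Int.toNat_natCast]
      set m := ((cs.drop (i + 1)).takeWhile (fun c => !decide (c = '"'))).length with hm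
      rw [pvScan1_eq cs i (cs.drop (i + 1)) (i + 1) rfl (by omega)]
      rw [← hm]
      by_cases hlt : i + 1 + m < cs.length
      · have hltI : ((i + 1 : Nat) : Int) + (m : Int) < (cs.length : Int) := by push_cast; omega
        simp only [if_pos hlt, if_pos hltI]
        rw [Prod.mk.injEq]
        refine ⟨?_, ?_⟩
        · congr 1
          rw [PySem.List.slice_toNat cs (by omega : (0:Int) ≤ start + (k:Int)) (by push_cast; omega : (0:Int) ≤ ((i+1:Nat):Int) + (m:Int) + 1)]
          have e1 : (start + (k : Int)).toNat = i := by omega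
          have e2 : (((i + 1 : Nat) : Int) + (m : Int) + 1).toNat = i + 1 + m + 1 := by push_cast; omega
          rw [e1, e2]
        · push_cast; omega
      · have hltI : ¬ (((i + 1 : Nat) : Int) + (m : Int) < (cs.length : Int)) := by push_cast; omega
        simp only [if_neg hlt, if_neg hltI]
        rw [Prod.mk.injEq]
        refine ⟨?_, ?_⟩
        · congr 1
          rw [PySem.List.slice_from cs (by omega : (0:Int) ≤ start + (k:Int))]
          congr 1; omega
        · rfl
    · -- non-quote branch
      rw [hgetD]
      simp only [if_neg hq, hdropc, pvScan0]
      have hns : PySem.Chars.isspace c = false := by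
        have hdw : cs.drop i = (cs.drop start.toNat).dropWhile PySem.Chars.isspace := by
          rw [hdropi, hk, pvDropTakeWhile]
        exact pvHeadDropWhile PySem.Chars.isspace (cs.drop start.toNat) c
          (by rw [← hdw, hdropc]; rfl)
      simp only [hns, Bool.false_eq_true, if_false, if_neg hq]
      rw [pvIdentEnd_eq cs (start + (k : Int)) (by omega), hiInt]
      simp only [Int.toNat_natCast]
      set t := ((cs.drop i).takeWhile (fun c => decide (c ∈ pvIdentSetA))).length with ht
      by_cases hmem : c ∈ pvIdentSetA
      · have hmemB : c ∈ pvIdentSetB := by rw [pvSetsAB]; exact hmem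
        simp only [if_pos hmemB]
        rw [pvScan2_eq cs i (cs.drop (i + 1)) (i + 1) rfl (by omega) (by omega)]
        have htt : t = ((cs.drop (i + 1)).takeWhile (fun c => decide (c ∈ pvIdentSetB))).length + 1 := by
          rw [ht, hdropc, List.takeWhile_cons, pvSetsAB]
          simp [hmem]
        have hne : ¬ ((i : Int) + (t : Int) = (i : Int)) := by omega
        simp only [hne, if_false]
        rw [Prod.mk.injEq]
        refine ⟨?_, ?_⟩
        · congr 1
          rw [PySem.List.slice_toNat cs (by push_cast; omega : (0:Int) ≤ (i:Int)) (by push_cast; omega : (0:Int) ≤ (i:Int) + (t:Int))]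
          simp only [Int.toNat_natCast]
          congr 1 <;> omega
        · push_cast; omega
      · have hmemB : c ∉ pvIdentSetB := by rw [pvSetsAB]; exact hmem
        simp only [if_neg hmemB]
        have ht0 : t = 0 := by
          rw [ht, hdropc, List.takeWhile_cons]
          simp [hmem]
        rw [ht0]
        simp

set_option maxRecDepth 4096 in
theorem read_identifier_py_changed : Claim_changed_read_identifier_py := by
  unfold Claim_changed_read_identifier_py; decide
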